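-- pv_equiv track=rewrite | github.com/grugg1233/Cyber-Security---Crack-The-Cipher | src/cipherSubmit.py | is_reciprocal
-- ===== SOURCE A (Python) =====
-- ALPHABET = "ABCDEFGHIJKLMNOPQRSTUVWXYZ"
--
-- def is_reciprocal(mapping: dict) -> bool:
--     #sanity check for reciprocity of mapping
--     for a in ALPHABET:
--         #b is the pair of a
--         b = mapping.get(a, a)
--         if b not in ALPHABET:
--             return False
--         # check that a is the pair of b
--         if mapping.get(b, b) != a:
--             return False
--     return True
-- ===== SOURCE B (Python) =====
-- ALPHABET = "ABCDEFGHIJKLMNOPQRSTUVWXYZ"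
-- LETTERS = set(ALPHABET)
--
-- def is_reciprocal(mapping: dict) -> bool:
--     # A letter absent from the dict (or mapped to itself) maps to itself and is
--     # trivially reciprocal, so only the dict's own entries that move an alphabet
--     # letter can break reciprocity: scan the mapping's items instead of the alphabet.
--     for k, v in mapping.items():
--         if k in LETTERS and v != k:
--             if v not in ALPHABET:
--                 return False
--             if mapping.get(v, v) != k:
--                 return False
--     return True
-- ===== Notes on version B (the rewrite author's own statement) =====
-- stated objective: alternative
-- what changed: B inverts the traversal: instead of scanning all 26 alphabet letters and looking each one up (A), it scans only the mapping's own entries, skips entries whose key is not a single alphabet letter or which map a letter to itself (those are trivially reciprocal), and validates the remaining entries; Pre_ excludes association lists with duplicate keys, which do not represent any Python dict (A-as-Python never receives them).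
import Mathlib
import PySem

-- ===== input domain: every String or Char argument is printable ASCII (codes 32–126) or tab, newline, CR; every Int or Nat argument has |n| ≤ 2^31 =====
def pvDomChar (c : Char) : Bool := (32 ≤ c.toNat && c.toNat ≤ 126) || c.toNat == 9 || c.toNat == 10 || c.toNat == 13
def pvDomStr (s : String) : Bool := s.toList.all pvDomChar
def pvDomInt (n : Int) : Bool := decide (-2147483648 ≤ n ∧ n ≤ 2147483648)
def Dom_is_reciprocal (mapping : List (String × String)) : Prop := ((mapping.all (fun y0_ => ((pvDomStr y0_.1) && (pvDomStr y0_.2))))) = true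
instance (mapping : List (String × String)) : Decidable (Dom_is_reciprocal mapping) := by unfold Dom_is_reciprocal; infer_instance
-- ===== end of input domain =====

-- B inverts the traversal: it scans the mapping's entries (skipping entries that do not move an
-- alphabet letter, which are trivially reciprocal) instead of scanning the 26 alphabet letters.

def pvALPHABET : String := "ABCDEFGHIJKLMNOPQRSTUVWXYZ"

def pvLetters : List String :=
  ["A","B","C","D","E","F","G","H","I","J","K","L","M",
   "N","O","P","Q","R","S","T","U","V","W","X","Y","Z"]

-- mapping.get(k, d) — Python dict.get
def pvGetD (m : List (String × String)) (k d : String) : String :=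
  (PySem.Dict.mk m).getD k d

-- ===== PORT A =====
def pvALoop (m : List (String × String)) : List String → Bool
  | [] => true
  | a :: rest =>
      let b := pvGetD m a a
      if PySem.Str.isIn b pvALPHABET = false then false
      else if pvGetD m b b ≠ a then false
      else pvALoop m rest

def is_reciprocal (mapping : List (String × String)) : Bool :=
  pvALoop mapping pvLetters

-- ===== PORT B =====
-- LETTERS = set(ALPHABET)
def pvLETTERS : PySem.Set String := PySem.Set.ofList pvLetters

def pvBLoop (m : List (String × String)) : List (String × String) → Bool
  | [] => true
  | (k, v) :: rest =>
      if PySem.Set.contains pvLETTERS k && (v != k) then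
        if PySem.Str.isIn v pvALPHABET = false then false
        else if pvGetD m v v ≠ k then false
        else pvBLoop m rest
      else pvBLoop m rest

def is_reciprocal_alt (mapping : List (String × String)) : Bool :=
  pvBLoop mapping mapping

-- ===== PRECONDITION & SPEC =====
-- Pre_ excludes association lists with duplicate keys: those do not represent any Python dict
-- (the Python function always receives a dict), and first-match shadowing makes B's item scan
-- see entries A's lookups never can.
def Pre_is_reciprocal (mapping : List (String × String)) : Prop :=
  (mapping.map Prod.fst).Nodup
instance (mapping : List (String × String)) : Decidable (Pre_is_reciprocal mapping) := by unfold Pre_is_reciprocal; infer_instance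

def pvWitness_is_reciprocal : (List (String × String)) := [("A","B"),("B","A")]

def Spec_is_reciprocal (mapping : List (String × String)) (out : Bool) : Prop := out = is_reciprocal_alt mapping
instance (mapping : List (String × String)) (out : Bool) : Decidable (Spec_is_reciprocal mapping out) := by unfold Spec_is_reciprocal; infer_instance

-- ===== CLAIM (what is proved, stated in full; the proofs are below) =====
def Claim_equal_is_reciprocal : Prop := ∀ (mapping : List (String × String)), Dom_is_reciprocal mapping → Pre_is_reciprocal mapping → Spec_is_reciprocal mapping (is_reciprocal mapping)

-- ===== LEMMAS AND PROOFS =====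

-- dict.get on a nodup-key list returns the stored value of a present key …
theorem pvGetD_of_mem (m : List (String × String)) (k v d : String)
    (hn : (m.map Prod.fst).Nodup) (hmem : (k, v) ∈ m) : pvGetD m k d = v := by
  exact PySem.Dict.getD_of_mem_items (PySem.Dict.mk m) hmem hn d

-- … and otherwise either the default or some stored value.
theorem pvGetD_cases (m : List (String × String)) (k d : String) :
    pvGetD m k d = d ∨ ∃ v, (k, v) ∈ m ∧ pvGetD m k d = v := by
  unfold pvGetD
  cases h : (PySem.Dict.mk m).get? k with
  | none => exact Or.inl (PySem.Dict.getD_of_get?_eq_none (PySem.Dict.mk m) d h)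
  | some v =>
      exact Or.inr ⟨v, PySem.Dict.mem_items_of_get?_eq_some (PySem.Dict.mk m) h,
        PySem.Dict.getD_of_get?_eq_some (PySem.Dict.mk m) d h⟩

theorem pvALoop_iff (m : List (String × String)) (l : List String) :
    pvALoop m l = true ↔
      ∀ a ∈ l, PySem.Str.isIn (pvGetD m a a) pvALPHABET = true ∧
        pvGetD m (pvGetD m a a) (pvGetD m a a) = a := by
  induction l with
  | nil => simp [pvALoop]
  | cons a rest ih =>
      simp only [pvALoop, List.mem_cons]
      split_ifs with h1 h2
      · constructor
        · intro h; exact absurd h (by simp)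
        · intro h; have := (h a (Or.inl rfl)).1; rw [this] at h1; cases h1
      · constructor
        · intro h; exact absurd h (by simp)
        · intro h; exact absurd (h a (Or.inl rfl)).2 h2
      · rw [ih]
        constructor
        · rintro h x (rfl | hx)
          · exact ⟨by simpa using h1, by simpa using h2⟩
          · exact h x hx
        · intro h x hx; exact h x (Or.inr hx)

theorem pvBLoop_iff (m : List (String × String)) (l : List (String × String)) :
    pvBLoop m l = true ↔
      ∀ p ∈ l, (PySem.Set.contains pvLETTERS p.1 && (p.2 != p.1)) = true →
        PySem.Str.isIn p.2 pvALPHABET = true ∧ pvGetD m p.2 p.2 = p.1 := by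
  induction l with
  | nil => simp [pvBLoop]
  | cons p rest ih =>
      obtain ⟨k, v⟩ := p
      simp only [pvBLoop, List.mem_cons]
      split_ifs with hc h1 h2
      · constructor
        · intro h; exact absurd h (by simp)
        · intro h; have := (h (k, v) (Or.inl rfl) hc).1; rw [this] at h1; cases h1
      · constructor
        · intro h; exact absurd h (by simp)
        · intro h; exact absurd (h (k, v) (Or.inl rfl) hc).2 h2
      · rw [ih]
        constructor
        · rintro h x (rfl | hx)
          · intro _; exact ⟨by simpa using h1, by simpa using h2⟩
          · exact h x hx
        · intro h x hx; exact h x (Or.inr hx)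
      · rw [ih]
        constructor
        · rintro h x (rfl | hx)
          · intro hx'; exact absurd hx' hc
          · exact h x hx
        · intro h x hx; exact h x (Or.inr hx)

theorem letters_isIn : ∀ a ∈ pvLetters, PySem.Str.isIn a pvALPHABET = true := by decide

theorem letters_contains : ∀ a ∈ pvLetters, PySem.Set.contains pvLETTERS a = true := by decide

theorem contains_letters (a : String) (h : PySem.Set.contains pvLETTERS a = true) : a ∈ pvLetters := by
  have : a ∈ pvLETTERS := by simpa [PySem.Set.contains] using h
  exact (PySem.Set.mem_ofList _ _).mp this

-- ===== VERDICT (by name: the statement is the Claim_ definition above) =====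
theorem is_reciprocal_spec : Claim_equal_is_reciprocal := by
  intro mapping _ hpre
  unfold Spec_is_reciprocal is_reciprocal is_reciprocal_alt
  rw [Bool.eq_iff_iff, pvALoop_iff, pvBLoop_iff]
  constructor
  · rintro hA ⟨k, v⟩ hmem hcond
    simp only [Bool.and_eq_true, bne_iff_ne, ne_eq] at hcond
    obtain ⟨hk, hvk⟩ := hcond
    have hka : k ∈ pvLetters := contains_letters k hk
    have hfk : pvGetD mapping k k = v := pvGetD_of_mem mapping k v k hpre hmem
    have := hA k hka
    rw [hfk] at this
    exact this
  · intro hB a ha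
    rcases pvGetD_cases mapping a a with hid | ⟨v, hmem, hv⟩
    · refine ⟨by rw [hid]; exact letters_isIn a ha, by rw [hid, hid]⟩
    · by_cases hva : v = a
      · subst hva
        refine ⟨by rw [hv]; exact letters_isIn _ ha, by rw [hv, hv]⟩
      · have := hB (a, v) hmem (by
          simp only [Bool.and_eq_true, bne_iff_ne, ne_eq]
          exact ⟨letters_contains a ha, hva⟩)
        rw [hv]
        exact ⟨this.1, this.2⟩
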